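-- pv_equiv track=rewrite | github.com/copperdogma/cine-forge | src/cine_forge/export/screenplay.py | _split_pre_scene
-- ===== SOURCE A (Python) =====
-- def _split_pre_scene(text: str) -> tuple[list[str], list[str]]:
--     lines = text.splitlines()
--     title_lines = []
--     teaser_lines = []
--     script_started = False
--     markers = ["TEASER", "ACT ONE", "FADE IN", "EXT.", "INT."]
--
--     for line in lines:
--         if not script_started:
--             upper_line = line.strip().upper()
--             if any(m in upper_line for m in markers):
--                 script_started = True
--                 teaser_lines.append(line)
--             else:
--                 title_lines.append(line)
--         else:
--             teaser_lines.append(line)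
--     return title_lines, teaser_lines
-- ===== SOURCE B (Python) =====
-- def _split_pre_scene(text: str) -> tuple[list[str], list[str]]:
--     lines = text.splitlines()
--     markers = ["TEASER", "ACT ONE", "FADE IN", "EXT.", "INT."]
--
--     def hit(line: str) -> bool:
--         u = line.strip().upper()
--         return any(m in u for m in markers)
--
--     i = next((k for k, line in enumerate(lines) if hit(line)), len(lines))
--     return lines[:i], lines[i:]
-- ===== Notes on version B (the rewrite author's own statement) =====
-- stated objective: simpler
-- what changed: Replaced the stateful loop with a script_started flag and per-line append dispatch by a find-first-marker-index scan followed by two slices (lines[:i], lines[i:]).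
import Mathlib
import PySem

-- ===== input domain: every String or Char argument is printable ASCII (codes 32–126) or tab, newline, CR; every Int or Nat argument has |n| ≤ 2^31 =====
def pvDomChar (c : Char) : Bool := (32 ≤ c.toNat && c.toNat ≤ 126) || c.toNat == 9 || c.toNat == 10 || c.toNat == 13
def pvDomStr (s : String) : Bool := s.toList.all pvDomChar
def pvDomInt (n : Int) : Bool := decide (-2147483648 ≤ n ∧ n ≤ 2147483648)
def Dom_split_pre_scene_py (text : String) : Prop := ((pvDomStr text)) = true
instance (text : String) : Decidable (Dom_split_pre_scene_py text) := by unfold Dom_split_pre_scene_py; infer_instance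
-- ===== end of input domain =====

-- B replaces A's stateful flag loop by a find-first-marker-index scan plus two slices (simpler decomposition).

-- the marker list and the per-line test 'any(m in line.strip().upper() for m in markers)', shared verbatim by both Pythons
def pvMarkers : List String := ["TEASER", "ACT ONE", "FADE IN", "EXT.", "INT."]
def pvHit (line : String) : Bool :=
  pvMarkers.any (fun m => PySem.Str.isIn m (PySem.Str.upper (PySem.Str.strip line)))

-- ===== PORT A =====
-- one pass carrying (title_lines, teaser_lines, script_started), exactly as A's for-loop
def splitStepA (st : List String × List String × Bool) (line : String) :
    List String × List String × Bool :=
  match st with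
  | (title, teaser, started) =>
    if started then (title, teaser ++ [line], true)
    else if pvHit line then (title, teaser ++ [line], true)
    else (title ++ [line], teaser, false)

def split_pre_scene_py (text : String) : List String × List String :=
  let lines := PySem.Str.splitlines text
  let r := lines.foldl splitStepA ([], [], false)
  (r.1, r.2.1)

-- ===== PORT B =====
def split_pre_scene_py_alt (text : String) : List String × List String :=
  let lines := PySem.Str.splitlines text
  let i := lines.findIdx pvHit
  (lines.take i, lines.drop i)

-- ===== PRECONDITION & SPEC =====
def Spec_split_pre_scene_py (text : String) (out : List String × List String) : Prop := out = split_pre_scene_py_alt text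
instance (text : String) (out : List String × List String) : Decidable (Spec_split_pre_scene_py text out) := by unfold Spec_split_pre_scene_py; infer_instance

-- ===== CLAIM (what is proved, stated in full; the proofs are below) =====
def Claim_equal_split_pre_scene_py : Prop := ∀ (text : String), Dom_split_pre_scene_py text → Spec_split_pre_scene_py text (split_pre_scene_py text)

-- ===== LEMMAS AND PROOFS =====
-- once script_started is true, every remaining line is appended to teaser_lines
theorem foldl_splitStepA_started (ls : List String) (t z : List String) :
    ls.foldl splitStepA (t, z, true) = (t, z ++ ls, true) := by
  induction ls generalizing z with
  | nil => simp
  | cons l ls ih => simp [List.foldl_cons, splitStepA, ih]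

-- A's loop from the not-yet-started state splits at the first line satisfying pvHit
theorem foldl_splitStepA_false (ls : List String) (t z : List String) :
    ls.foldl splitStepA (t, z, false) =
      (t ++ ls.take (ls.findIdx pvHit), z ++ ls.drop (ls.findIdx pvHit), ls.any pvHit) := by
  induction ls generalizing t with
  | nil => simp
  | cons l ls ih =>
    by_cases h : pvHit l
    · simp [List.foldl_cons, splitStepA, h, List.findIdx_cons, foldl_splitStepA_started]
    · simp [List.foldl_cons, splitStepA, h, List.findIdx_cons, ih]

-- ===== VERDICT (by name: the statement is the Claim_ definition above) =====
theorem split_pre_scene_py_spec : Claim_equal_split_pre_scene_py := by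
  intro text _
  unfold Spec_split_pre_scene_py split_pre_scene_py split_pre_scene_py_alt
  simp [foldl_splitStepA_false]
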